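-- pv_equiv track=rewrite | github.com/RishiKumar156/python | slidingwindow.py | findthesumofitem
-- ===== SOURCE A (Python) =====
-- def findthesumofitem(arr, k):
--     if len(arr) <= 1:
--         return False
--     total = sum(arr[:k])
--     maxt = total
--     for i in range(len(arr) - k):
--         total -= arr[i]
--         total += arr[i+k]
--         maxt = max(maxt , total)
--     return maxt
-- ===== SOURCE B (Python) =====
-- def findthesumofitem(arr, k):
--     if len(arr) <= 1:
--         return False
--     n = len(arr)
--     prefix = [0]
--     for x in arr:
--         prefix.append(prefix[-1] + x)
--     if k >= n:
--         return prefix[n]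
--     return max(prefix[i + k] - prefix[i] for i in range(n - k + 1))
-- ===== Notes on version B (the rewrite author's own statement) =====
-- stated objective: alternative
-- what changed: Replaces A's sliding-window running total (subtract the leaving element, add the entering one, track the running max) with a prefix-sum table: each window sum is prefix[i+k]-prefix[i] and the answer is the max of these differences, with an explicit whole-array case for k >= len(arr).
-- outside the precondition, e.g. on findthesumofitem([5], 3): A returns False, B returns False
import Mathlib
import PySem

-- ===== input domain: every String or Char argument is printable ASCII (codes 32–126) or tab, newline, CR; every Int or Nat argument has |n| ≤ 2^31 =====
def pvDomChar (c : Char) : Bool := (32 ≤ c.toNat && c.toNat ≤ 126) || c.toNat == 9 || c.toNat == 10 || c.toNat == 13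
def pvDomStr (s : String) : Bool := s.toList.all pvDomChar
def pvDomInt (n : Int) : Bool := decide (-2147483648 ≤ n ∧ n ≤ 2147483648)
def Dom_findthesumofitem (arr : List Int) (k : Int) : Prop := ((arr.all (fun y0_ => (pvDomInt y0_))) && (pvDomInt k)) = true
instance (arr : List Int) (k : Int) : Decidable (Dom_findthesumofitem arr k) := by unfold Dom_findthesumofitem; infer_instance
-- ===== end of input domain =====

-- B replaces A's sliding-window running total with a direct brute-force maximum of the
-- explicit window sums (simpler decomposition; not faster).


-- ===== PORT A =====
-- Literal port of A. The `len(arr) <= 1` branch returns Python `False` (a bool, not an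
-- int) and negative k raises IndexError inside the loop; both are excluded by Pre_,
-- so the `0` defaults below are never reached on admitted inputs.
def findthesumofitem (arr : List Int) (k : Int) : Int :=
  if arr.length ≤ 1 then 0
  else
    let total := (PySem.List.slice arr none (some k)).sum
    let st := (PySem.List.pyRange 0 ((arr.length : Int) - k) 1).foldl
      (fun (st : Int × Int) i =>
        let t := st.2 - PySem.List.pyGetD arr i 0 + PySem.List.pyGetD arr (i + k) 0
        (max st.1 t, t)) (total, total)
    st.1

-- ===== PORT B =====
-- Literal port of Source B; `prefix[-1]`, `prefix[n]`, `prefix[i+k]`, `prefix[i]` are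
-- PySem.List.pyGetD (all indices in range under Pre_, so the defaults are unreachable);
-- Python's `max` over the (nonempty under Pre_) generator is PySem.List.max? with
-- identity key (`.getD 0` is unreachable there).
def findthesumofitem_alt (arr : List Int) (k : Int) : Int :=
  if arr.length ≤ 1 then 0
  else
    let n : Int := arr.length
    let pre := arr.foldl (fun p x => p ++ [PySem.List.pyGetD p (-1) 0 + x]) [0]
    if n ≤ k then PySem.List.pyGetD pre n 0
    else
      (PySem.List.max?
        ((PySem.List.pyRange 0 (n - k + 1) 1).map
          (fun i => PySem.List.pyGetD pre (i + k) 0 - PySem.List.pyGetD pre i 0))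
        (fun x => x)).getD 0

-- ===== PRECONDITION & SPEC =====
-- Pre_ excludes arr of length ≤ 1, where A returns False (a bool, not a value of the
-- declared int type), and negative k, where A raises IndexError.
def Pre_findthesumofitem (arr : List Int) (k : Int) : Prop := 2 ≤ arr.length ∧ 0 ≤ k
instance (arr : List Int) (k : Int) : Decidable (Pre_findthesumofitem arr k) := by unfold Pre_findthesumofitem; infer_instance
def pvWitness_findthesumofitem : List Int × Int := ([3, -1, 4, 1], 2)

def Spec_findthesumofitem (arr : List Int) (k : Int) (out : Int) : Prop := out = findthesumofitem_alt arr k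
instance (arr : List Int) (k : Int) (out : Int) : Decidable (Spec_findthesumofitem arr k out) := by unfold Spec_findthesumofitem; infer_instance

-- ===== CLAIM (what is proved, stated in full; the proofs are below) =====
def Claim_equal_findthesumofitem : Prop := ∀ (arr : List Int) (k : Int), Dom_findthesumofitem arr k → Pre_findthesumofitem arr k → Spec_findthesumofitem arr k (findthesumofitem arr k)

-- ===== LEMMAS AND PROOFS =====

-- prefix sum S, window sum W, running max M (proof-only helpers)
def pvS (arr : List Int) (j : Nat) : Int := (arr.take j).sum

def pvW (arr : List Int) (kn i : Nat) : Int := pvS arr (i + kn) - pvS arr i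

def pvM (arr : List Int) (kn m : Nat) : Int :=
  ((List.range m).map (fun j => pvW arr kn (j + 1))).foldl max (pvW arr kn 0)

lemma pvS_succ (arr : List Int) (j : Nat) (h : j < arr.length) :
    pvS arr (j + 1) = pvS arr j + arr[j] := by
  unfold pvS
  rw [List.take_add_one, List.getElem?_eq_getElem h, List.sum_append]
  simp

lemma prefix_foldl (arr : List Int) :
    arr.foldl (fun p x => p ++ [PySem.List.pyGetD p (-1) 0 + x]) ([0] : List Int)
      = (List.range (arr.length + 1)).map (fun j => pvS arr j) := by
  induction arr using List.reverseRecOn with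
  | nil => simp [pvS]
  | append_singleton arr x ih =>
    rw [List.foldl_append, ih, List.foldl_cons, List.foldl_nil]
    have hlast : PySem.List.pyGetD ((List.range (arr.length + 1)).map (fun j => pvS arr j)) (-1) 0
        = pvS arr arr.length := by
      rw [List.range_succ, List.map_append, List.map_singleton,
        PySem.List.pyGetD_neg_one_append_singleton]
    rw [hlast]
    have hlen : (arr ++ [x]).length + 1 = (arr.length + 1) + 1 := by simp
    rw [hlen, List.range_succ (n := arr.length + 1), List.map_append, List.map_singleton]
    congr 1
    · apply List.map_congr_left
      intro j hj
      have hj' : j ≤ arr.length := by simpa [Nat.lt_succ_iff] using hj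
      simp [pvS, List.take_append_of_le_length hj']
    · simp [pvS, List.take_of_length_le]

lemma prefix_get (arr : List Int) (j : Nat) (hj : j ≤ arr.length) :
    PySem.List.pyGetD ((List.range (arr.length + 1)).map (fun j => pvS arr j)) (j : Int) 0
      = pvS arr j := by
  rw [PySem.List.pyGetD_natCast]
  rw [List.getD_eq_getElem _ _ (by simpa using Nat.lt_succ_of_le hj)]
  simp

lemma pvM_succ (arr : List Int) (kn m : Nat) :
    pvM arr kn (m + 1) = max (pvM arr kn m) (pvW arr kn (m + 1)) := by
  simp [pvM, List.range_succ]

lemma step_eq (arr : List Int) (kn i : Nat) (h : i + kn < arr.length) :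
    pvW arr kn i - PySem.List.pyGetD arr (i : Int) 0
      + PySem.List.pyGetD arr ((i : Int) + (kn : Int)) 0 = pvW arr kn (i + 1) := by
  have hi : i < arr.length := by omega
  have h1 : PySem.List.pyGetD arr (i : Int) 0 = arr[i] := by
    rw [PySem.List.pyGetD_natCast, List.getD_eq_getElem]
  have h2 : PySem.List.pyGetD arr ((i : Int) + (kn : Int)) 0 = arr[i + kn] := by
    rw [show ((i : Int) + (kn : Int)) = ((i + kn : Nat) : Int) by push_cast; ring,
      PySem.List.pyGetD_natCast, List.getD_eq_getElem]
  have e1 := pvS_succ arr i hi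
  have e2 := pvS_succ arr (i + kn) h
  rw [h1, h2]
  simp only [pvW] at *
  rw [show i + 1 + kn = i + kn + 1 from by omega]
  omega

lemma foldA (arr : List Int) (kn : Nat) :
    ∀ m : Nat, m + kn ≤ arr.length →
    (PySem.List.pyRange 0 (m : Int) 1).foldl
      (fun (st : Int × Int) i =>
        let t := st.2 - PySem.List.pyGetD arr i 0 + PySem.List.pyGetD arr (i + (kn : Int)) 0
        (max st.1 t, t)) (pvW arr kn 0, pvW arr kn 0)
      = (pvM arr kn m, pvW arr kn m) := by
  intro m
  induction m with
  | zero => intro _; simp [PySem.List.pyRange_one_eq_nil, pvM]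
  | succ m ih =>
    intro h
    have hm : (0 : Int) ≤ (m : Int) := by positivity
    have hcast : ((m + 1 : Nat) : Int) = (m : Int) + 1 := by push_cast; ring
    rw [hcast, PySem.List.pyRange_one_succ_right hm, List.foldl_append,
      ih (by omega)]
    simp only [List.foldl_cons, List.foldl_nil]
    rw [step_eq arr kn m (by omega), pvM_succ]

-- B's mapped list of prefix differences is the list of window sums W
lemma mapB (arr : List Int) (kn : Nat) (m : Nat) (h : m + kn ≤ arr.length + 1) :
    (PySem.List.pyRange 0 ((m : Nat) : Int) 1).map
      (fun i => PySem.List.pyGetD ((List.range (arr.length + 1)).map (fun j => pvS arr j)) (i + (kn : Int)) 0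
        - PySem.List.pyGetD ((List.range (arr.length + 1)).map (fun j => pvS arr j)) i 0)
      = (List.range m).map (fun j => pvW arr kn j) := by
  rw [PySem.List.pyRange_zero_nat]
  rw [List.map_map]
  apply List.map_congr_left
  intro j hj
  have hjm : j < m := List.mem_range.mp hj
  simp only [Function.comp]
  rw [show ((j : Int) + (kn : Int)) = ((j + kn : Nat) : Int) by push_cast; ring,
    prefix_get arr (j + kn) (by omega), prefix_get arr j (by omega)]
  rfl

lemma maxB (arr : List Int) (kn m : Nat) :
    PySem.List.max? ((List.range (m + 1)).map (fun j => pvW arr kn j)) (fun x => x)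
      = some (pvM arr kn m) := by
  rw [List.range_succ_eq_map, List.map_cons, PySem.List.max?_id_cons, List.map_map]
  rfl

-- ===== VERDICT (by name: the statement is the Claim_ definition above) =====
theorem findthesumofitem_spec : Claim_equal_findthesumofitem := by
  intro arr k _ hpre
  obtain ⟨hlen, hk⟩ := hpre
  lift k to ℕ using hk with kn
  unfold Spec_findthesumofitem findthesumofitem findthesumofitem_alt
  rw [if_neg (by omega), if_neg (by omega)]
  by_cases hbig : (arr.length : Int) ≤ (kn : Int)
  · -- k ≥ n : A's loop is empty, initial total = sum arr = prefix[n]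
    rw [if_pos hbig]
    have hrange : PySem.List.pyRange 0 ((arr.length : Int) - (kn : Int)) 1 = [] :=
      PySem.List.pyRange_one_eq_nil (by omega)
    have hslice : PySem.List.slice arr none (some ((kn : Nat) : Int)) = arr := by
      rw [PySem.List.slice_to_natCast]
      exact List.take_of_length_le (by exact_mod_cast hbig)
    simp [hrange, hslice, prefix_foldl, pvS]
  · rw [if_neg hbig]
    have hkn : kn < arr.length := by omega
    have hm : ((arr.length - kn : Nat) : Int) = (arr.length : Int) - (kn : Int) := by
      push_cast [Nat.cast_sub (le_of_lt hkn)]; ring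
    have hm1 : ((arr.length - kn : Nat) : Int) + 1 = ((arr.length - kn + 1 : Nat) : Int) := by
      push_cast; ring
    have hslice : PySem.List.slice arr none (some ((kn : Nat) : Int)) = arr.take kn :=
      PySem.List.slice_to_natCast arr kn
    have hW0 : (arr.take kn).sum = pvW arr kn 0 := by
      simp [pvW, pvS]
    rw [← hm, hm1]
    simp only [hslice, hW0, prefix_foldl, foldA arr kn (arr.length - kn) (by omega),
      mapB arr kn (arr.length - kn + 1) (by omega), maxB, Option.getD_some]
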